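-- pv_equiv track=rewrite | github.com/EMSTrack/EMSTrack-Dashboard | aaa.py | get_ambulance_colors
-- ===== SOURCE A (Python) =====
-- main_colors = {
--     'main-blue': '#343a40',
--     'medium-blue-grey': 'rgb(77, 79, 91)',
--     'superdark-green': 'rgb(41, 56, 55)',
--     'dark-green': 'rgb(57, 81, 85)',
--     'medium-green': 'rgb(93, 113, 120)',
--     'light-green': 'rgb(186, 218, 212)',
--     'pink-red': 'rgb(255, 101, 131)',
--     'dark-pink-red': 'rgb(247, 80, 99)',
--     'white': 'rgb(251, 251, 252)',
--     'light-grey': 'rgb(208, 206, 206)'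
-- }
--
-- def get_ambulance_colors(ambulances):
--     colors = list(main_colors.values())
--     color_map = {}
--     i = 0  # cycle through all main colors
--     for ambulance in ambulances:
--         id = ambulance['id']
--         if id not in color_map:
--             color_map[id] = colors[i]
--             if i < len(colors) - 1:
--                 i += 1
--             else:
--                 i = 0
--     return color_map
-- ===== SOURCE B (Python) =====
-- main_colors = {
--     'main-blue': '#343a40',
--     'medium-blue-grey': 'rgb(77, 79, 91)',
--     'superdark-green': 'rgb(41, 56, 55)',
--     'dark-green': 'rgb(57, 81, 85)',
--     'medium-green': 'rgb(93, 113, 120)',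
--     'light-green': 'rgb(186, 218, 212)',
--     'pink-red': 'rgb(255, 101, 131)',
--     'dark-pink-red': 'rgb(247, 80, 99)',
--     'white': 'rgb(251, 251, 252)',
--     'light-grey': 'rgb(208, 206, 206)'
-- }
--
-- def get_ambulance_colors(ambulances):
--     colors = list(main_colors.values())
--     # phase 1: earliest position of each id (unconditional min-aggregation)
--     first = {}
--     for pos, ambulance in enumerate(ambulances):
--         id = ambulance['id']
--         first[id] = min(first.get(id, pos), pos)
--     # phase 2: order ids by earliest position, tile the palette, pair them up
--     unique = sorted(first, key=first.get)
--     tiled = (colors * (len(unique) // len(colors) + 1))[:len(unique)]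
--     return dict(zip(unique, tiled))
-- ===== Notes on version B (the rewrite author's own statement) =====
-- stated objective: alternative
-- what changed: A's fused loop (membership test + wrapping counter) is replaced by a min-aggregation pass recording each id's earliest position, a sort of the ids by that position, and a zip against a palette tiled to length by list repetition and slicing.
import Mathlib
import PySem

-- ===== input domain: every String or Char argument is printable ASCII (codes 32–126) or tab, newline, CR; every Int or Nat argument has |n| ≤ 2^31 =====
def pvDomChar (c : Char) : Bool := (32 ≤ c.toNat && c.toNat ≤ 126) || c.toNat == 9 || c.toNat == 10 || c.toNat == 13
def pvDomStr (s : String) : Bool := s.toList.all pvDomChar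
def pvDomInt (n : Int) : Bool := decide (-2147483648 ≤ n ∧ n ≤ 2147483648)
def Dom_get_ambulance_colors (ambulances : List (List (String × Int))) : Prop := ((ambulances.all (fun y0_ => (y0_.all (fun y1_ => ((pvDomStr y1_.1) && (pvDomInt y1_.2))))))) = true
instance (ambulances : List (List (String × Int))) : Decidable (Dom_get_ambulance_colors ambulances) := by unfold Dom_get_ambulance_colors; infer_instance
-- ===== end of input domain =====

-- B replaces A's fused loop (inline membership test + wrap-around counter) by a min-aggregation
-- pass over positions, a sort of the ids by earliest position, and a zip with a tiled palette
-- (alternative decomposition, same asymptotic cost).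


-- list(main_colors.values()), shared module constant of both sources
def pvColors : List String :=
  ["#343a40", "rgb(77, 79, 91)", "rgb(41, 56, 55)", "rgb(57, 81, 85)",
   "rgb(93, 113, 120)", "rgb(186, 218, 212)", "rgb(255, 101, 131)",
   "rgb(247, 80, 99)", "rgb(251, 251, 252)", "rgb(208, 206, 206)"]

-- ambulance['id'] (dict lookup = first match; none = KeyError, excluded by Pre_)
def pvGetId? (a : List (String × Int)) : Option Int :=
  (a.find? (fun p => p.1 == "id")).map (·.2)

-- ===== PORT A =====
def get_ambulance_colors (ambulances : List (List (String × Int))) : List (Int × String) :=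
  let colors := pvColors
  let res := ambulances.foldl
    (fun st ambulance =>
      match st with
      | none => none
      | some (color_map, i) =>
        match pvGetId? ambulance with
        | none => none         -- KeyError: 'id' missing (outside Pre_)
        | some id =>
          if color_map.contains id then some (color_map, i)
          else some (color_map.insert id (PySem.List.pyGetD colors i ""),
                     if i < (colors.length : Int) - 1 then i + 1 else 0))
    (some ((PySem.Dict.empty : PySem.Dict Int String), (0 : Int)))
  match res with
  | some (color_map, _) => color_map.items
  | none => []

-- ===== PORT B =====
def get_ambulance_colors_alt (ambulances : List (List (String × Int))) : List (Int × String) :=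
  let colors := pvColors
  -- for pos, ambulance in enumerate(ambulances): first[id] = min(first.get(id, pos), pos)
  let firstO := (PySem.List.enumerate ambulances 0).foldl
    (fun st q =>
      match st, pvGetId? q.2 with
      | some d, some id => some (d.insert id (min (d.getD id q.1) q.1))
      | _, _ => none)        -- KeyError: 'id' missing (outside Pre_)
    (some (PySem.Dict.empty : PySem.Dict Int Int))
  match firstO with
  | none => []
  | some first =>
    -- unique = sorted(first, key=first.get); every key is present, so .get = .getD _ 0 here
    let unique := PySem.List.sorted first.keys (fun k => first.getD k 0) false
    -- (colors * (len(unique) // len(colors) + 1))[:len(unique)] — '*' is replicate+flatten,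
    -- '//' on these Nats is Nat division, '[:m]' with 0 ≤ m is take: all exact here
    let tiled := (List.replicate (unique.length / colors.length + 1) colors).flatten.take unique.length
    (PySem.Dict.ofList (unique.zip tiled)).items    -- dict(zip(unique, tiled))

-- ===== PRECONDITION & SPEC =====
-- Pre_ excludes exactly the inputs where some ambulance dict has no 'id' key: there A raises KeyError.
def Pre_get_ambulance_colors (ambulances : List (List (String × Int))) : Prop :=
  (ambulances.all (fun a => (pvGetId? a).isSome)) = true
instance (ambulances : List (List (String × Int))) : Decidable (Pre_get_ambulance_colors ambulances) := by unfold Pre_get_ambulance_colors; infer_instance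

def pvWitness_get_ambulance_colors : (List (List (String × Int))) :=
  [[("id", 1)], [("id", 2), ("x", 0)], [("id", 1)]]

def Spec_get_ambulance_colors (ambulances : List (List (String × Int))) (out : List (Int × String)) : Prop := out = get_ambulance_colors_alt ambulances
instance (ambulances : List (List (String × Int))) (out : List (Int × String)) : Decidable (Spec_get_ambulance_colors ambulances out) := by unfold Spec_get_ambulance_colors; infer_instance

-- ===== CLAIM (what is proved, stated in full; the proofs are below) =====
def Claim_equal_get_ambulance_colors : Prop := ∀ (ambulances : List (List (String × Int))), Dom_get_ambulance_colors ambulances → Pre_get_ambulance_colors ambulances → Spec_get_ambulance_colors ambulances (get_ambulance_colors ambulances)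

-- ===== LEMMAS AND PROOFS =====

-- common specification both ports are reduced to: walk the id list, skip ids already seen,
-- assign the n-th fresh id the color pvColors[n % 10]
def pvSpec (ids : List Int) (seen : List Int) (n : Nat) : List (Int × String) :=
  match ids with
  | [] => []
  | x :: rest =>
    if x ∈ seen then pvSpec rest seen n
    else (x, pvColors.getD (n % 10) "") :: pvSpec rest (x :: seen) (n + 1)

theorem pvSpec_congr (ids : List Int) (s t : List Int) (n : Nat)
    (h : ∀ y, y ∈ s ↔ y ∈ t) : pvSpec ids s n = pvSpec ids t n := by
  induction ids generalizing s t n with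
  | nil => rfl
  | cons x rest ih =>
    simp only [pvSpec]
    by_cases hx : x ∈ s
    · rw [if_pos hx, if_pos ((h x).1 hx)]; exact ih s t n h
    · rw [if_neg hx, if_neg (fun hv => hx ((h x).2 hv))]
      refine congrArg _ (ih _ _ _ ?_)
      intro y; simp [h y]

-- pure-level transcription of A's loop body (on the id list)
def pvFoldA (ids : List Int) (d : PySem.Dict Int String) (i : Int) : PySem.Dict Int String × Int :=
  match ids with
  | [] => (d, i)
  | x :: rest =>
    if d.contains x then pvFoldA rest d i
    else pvFoldA rest (d.insert x (PySem.List.pyGetD pvColors i ""))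
           (if i < (pvColors.length : Int) - 1 then i + 1 else 0)

theorem foldA_eq (ambulances : List (List (String × Int))) (d : PySem.Dict Int String) (i : Int)
    (h : ∀ a ∈ ambulances, (pvGetId? a).isSome) :
    ambulances.foldl
      (fun st ambulance =>
        match st with
        | none => none
        | some (color_map, i) =>
          match pvGetId? ambulance with
          | none => none
          | some id =>
            if color_map.contains id then some (color_map, i)
            else some (color_map.insert id (PySem.List.pyGetD pvColors i ""),
                       if i < (pvColors.length : Int) - 1 then i + 1 else 0))
      (some (d, i))
    = some (pvFoldA (ambulances.map (fun a => (pvGetId? a).getD 0)) d i) := by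
  induction ambulances generalizing d i with
  | nil => rfl
  | cons a rest ih =>
    obtain ⟨id, hid⟩ := Option.isSome_iff_exists.1 (h a (by simp))
    simp only [List.foldl_cons, List.map_cons, hid, Option.getD_some, pvFoldA]
    by_cases hc : d.contains id
    · rw [if_pos hc]; simp only [hc, if_true]
      exact ih _ _ (fun a ha => h a (by simp [ha]))
    · rw [if_neg hc]; simp only [hc, Bool.false_eq_true, if_false]
      exact ih _ _ (fun a ha => h a (by simp [ha]))

theorem foldA_spec (ids : List Int) (d : PySem.Dict Int String) (n : Nat)
    (hnd : d.keys.Nodup) :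
    (pvFoldA ids d ((n % 10 : Nat) : Int)).1.items = d.items ++ pvSpec ids d.keys n := by
  induction ids generalizing d n with
  | nil => simp [pvFoldA, pvSpec]
  | cons x rest ih =>
    simp only [pvFoldA, pvSpec]
    by_cases hc : d.contains x = true
    · have hmem : x ∈ d.keys := (PySem.Dict.contains_iff_mem_keys d x).1 hc
      rw [if_pos hc, if_pos hmem]
      exact ih d n hnd
    · have hc' : d.contains x = false := by revert hc; cases d.contains x <;> simp
      have hmem : x ∉ d.keys := fun hm => by
        rw [(PySem.Dict.contains_iff_mem_keys d x).2 hm] at hc'; exact absurd hc' (by simp)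
      rw [if_neg hc, if_neg hmem]
      have h10 : pvColors.length = 10 := rfl
      have hcounter :
          (if ((n % 10 : Nat) : Int) < (pvColors.length : Int) - 1
           then ((n % 10 : Nat) : Int) + 1 else 0) = (((n + 1) % 10 : Nat) : Int) := by
        rw [h10]; split_ifs with h <;> [skip; push_cast at h] <;> push_cast <;> omega
      rw [hcounter, ih (d.insert x (PySem.List.pyGetD pvColors ((n % 10 : Nat) : Int) "")) (n + 1)
            (PySem.Dict.nodup_keys_insert _ _ _ hnd)]
      rw [PySem.Dict.items_insert_of_not_contains _ _ hc',
          PySem.Dict.keys_insert_of_not_contains _ _ hc']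
      rw [pvSpec_congr rest (d.keys ++ [x]) (x :: d.keys) (n + 1) (by intro y; simp [or_comm])]
      simp only [List.append_assoc, List.cons_append]
      congr 2
      rw [PySem.List.pyGetD_natCast]

-- ----- B side -----

-- first occurrences of the id list paired with their positions
def pvFresh (ids : List Int) (seen : List Int) (p : Nat) : List (Int × Int) :=
  match ids with
  | [] => []
  | x :: rest =>
    if x ∈ seen then pvFresh rest seen (p + 1)
    else (x, (p : Int)) :: pvFresh rest (x :: seen) (p + 1)

theorem pvFresh_congr (ids : List Int) (s t : List Int) (p : Nat)
    (h : ∀ y, y ∈ s ↔ y ∈ t) : pvFresh ids s p = pvFresh ids t p := by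
  induction ids generalizing s t p with
  | nil => rfl
  | cons x rest ih =>
    simp only [pvFresh]
    by_cases hx : x ∈ s
    · rw [if_pos hx, if_pos ((h x).1 hx)]; exact ih s t _ h
    · rw [if_neg hx, if_neg (fun hv => hx ((h x).2 hv))]
      refine congrArg _ (ih _ _ _ ?_)
      intro y; simp [h y]

theorem pvFresh_lb (ids : List Int) (seen : List Int) (p : Nat) :
    ∀ kv ∈ pvFresh ids seen p, (p : Int) ≤ kv.2 := by
  induction ids generalizing seen p with
  | nil => simp [pvFresh]
  | cons x rest ih =>
    intro kv hkv
    simp only [pvFresh] at hkv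
    split_ifs at hkv with hx
    · have := ih seen (p + 1) kv hkv; push_cast at this ⊢; omega
    · rcases List.mem_cons.1 hkv with h | h
      · subst h; simp
      · have := ih (x :: seen) (p + 1) kv h; push_cast at this ⊢; omega

theorem pvFresh_pairwise (ids : List Int) (seen : List Int) (p : Nat) :
    (pvFresh ids seen p).Pairwise (fun a b => a.2 < b.2) := by
  induction ids generalizing seen p with
  | nil => simp [pvFresh]
  | cons x rest ih =>
    simp only [pvFresh]
    split_ifs with hx
    · exact ih seen (p + 1)
    · refine List.Pairwise.cons ?_ (ih (x :: seen) (p + 1))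
      intro kv hkv
      have := pvFresh_lb rest (x :: seen) (p + 1) kv hkv
      push_cast at this ⊢; omega

-- overwriting a key with its stored value is the identity
theorem pv_insert_self_value (d : PySem.Dict Int Int) (x v : Int)
    (hnd : d.keys.Nodup) (h : d.get? x = some v) : d.insert x v = d := by
  apply PySem.Dict.ext
  have hc : d.contains x = true := by
    rw [PySem.Dict.contains_eq_isSome_get?, h]; rfl
  rw [PySem.Dict.items_insert_of_contains d v hc]
  have hid : ∀ q ∈ d.items, (if (q.1 == x) = true then (x, v) else q) = id q := by
    intro q hq
    obtain ⟨q1, q2⟩ := q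
    by_cases hqx : q1 = x
    · have hg := PySem.Dict.get?_of_mem_items d (k := q1) (v := q2) (by simpa using hq) hnd
      rw [hqx, h] at hg
      have hq2 : q2 = v := by injection hg with h'; omega
      simp [hqx, hq2]
    · simp [hqx]
  rw [List.map_congr_left hid, List.map_id]

-- unwrap the Option state of B's loop (all 'id' lookups succeed)
theorem foldB_eq (ambulances : List (List (String × Int))) (s : Int) (d : PySem.Dict Int Int)
    (h : ∀ a ∈ ambulances, (pvGetId? a).isSome) :
    (PySem.List.enumerate ambulances s).foldl
      (fun st q =>
        match st, pvGetId? q.2 with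
        | some d, some id => some (d.insert id (min (d.getD id q.1) q.1))
        | _, _ => none)
      (some d)
    = some ((PySem.List.enumerate (ambulances.map (fun a => (pvGetId? a).getD 0)) s).foldl
        (fun d q => d.insert q.2 (min (d.getD q.2 q.1) q.1)) d) := by
  induction ambulances generalizing s d with
  | nil => rfl
  | cons a rest ih =>
    obtain ⟨id, hid⟩ := Option.isSome_iff_exists.1 (h a (by simp))
    rw [List.map_cons, PySem.List.enumerate_cons, PySem.List.enumerate_cons]
    simp only [List.foldl_cons, hid, Option.getD_some]
    exact ih (s + 1) _ (fun a ha => h a (by simp [ha]))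

-- the min-aggregation loop appends exactly the first occurrences with their positions
theorem foldB_items (ids : List Int) (p : Nat) (d : PySem.Dict Int Int)
    (hnd : d.keys.Nodup) (hlt : ∀ kv ∈ d.items, kv.2 < (p : Int)) :
    ((PySem.List.enumerate ids ((p : Nat) : Int)).foldl
        (fun d q => d.insert q.2 (min (d.getD q.2 q.1) q.1)) d).items
    = d.items ++ pvFresh ids d.keys p := by
  induction ids generalizing d p with
  | nil => simp [PySem.List.enumerate_nil, pvFresh]
  | cons x rest ih =>
    rw [PySem.List.enumerate_cons, List.foldl_cons]
    simp only [pvFresh]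
    have hstep : ((p : Nat) : Int) + 1 = ((p + 1 : Nat) : Int) := by push_cast; ring
    by_cases hc : d.contains x = true
    · have hsome : (d.get? x).isSome := by
        rw [← PySem.Dict.contains_eq_isSome_get? d x]; exact hc
      obtain ⟨v, hv⟩ := Option.isSome_iff_exists.1 hsome
      have hvlt : v < (p : Int) := hlt (x, v) (PySem.Dict.mem_items_of_get?_eq_some d hv)
      have hmin : min (d.getD x ((p : Nat) : Int)) ((p : Nat) : Int) = v := by
        rw [PySem.Dict.getD_of_get?_eq_some d _ hv]; omega
      rw [hmin, pv_insert_self_value d x v hnd hv]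
      have hmem : x ∈ d.keys := (PySem.Dict.contains_iff_mem_keys d x).1 hc
      rw [if_pos hmem, hstep,
          ih (p + 1) d hnd (fun kv hkv => by have := hlt kv hkv; push_cast at this ⊢; omega)]
    · have hc' : d.contains x = false := by revert hc; cases d.contains x <;> simp
      have hmem : x ∉ d.keys := fun hm => by
        rw [(PySem.Dict.contains_iff_mem_keys d x).2 hm] at hc'; exact absurd hc' (by simp)
      rw [if_neg hmem]
      rw [PySem.Dict.getD_of_not_contains d _ hc', min_self, hstep,
          ih (p + 1) (d.insert x ((p : Nat) : Int))
            (PySem.Dict.nodup_keys_insert _ _ _ hnd)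
            (by intro kv hkv
                rw [PySem.Dict.items_insert_of_not_contains _ _ hc'] at hkv
                rcases List.mem_append.1 hkv with h | h
                · have := hlt kv h; push_cast at this ⊢; omega
                · simp at h; rw [h]; push_cast; omega)]
      rw [PySem.Dict.items_insert_of_not_contains _ _ hc',
          PySem.Dict.keys_insert_of_not_contains _ _ hc']
      rw [pvFresh_congr rest (d.keys ++ [x]) (x :: d.keys) (p + 1) (by intro y; simp [or_comm])]
      simp [List.append_assoc]

-- the tiled palette, elementwise
theorem flat_replicate_get (q k : Nat) (h : k < q * 10) :
    (List.replicate q pvColors).flatten[k]? = some (pvColors.getD (k % 10) "") := by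
  induction q generalizing k with
  | zero => omega
  | succ q ih =>
    rw [List.replicate_succ, List.flatten_cons]
    by_cases hk : k < 10
    · rw [List.getElem?_append_left (by simpa using hk)]
      rw [List.getElem?_eq_getElem (by simpa using hk), Nat.mod_eq_of_lt hk,
          List.getD_eq_getElem pvColors "" (by simpa using hk)]
    · have hk10 : 10 ≤ k := by omega
      rw [List.getElem?_append_right (by simpa using hk10)]
      have h10 : pvColors.length = 10 := rfl
      rw [h10, ih (k - 10) (by omega), Nat.mod_eq_sub_mod hk10]

theorem tiled_eq (m : Nat) :
    (List.replicate (m / pvColors.length + 1) pvColors).flatten.take m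
    = (List.range' 0 m).map (fun k => pvColors.getD (k % 10) "") := by
  have h10 : pvColors.length = 10 := rfl
  apply List.ext_getElem?
  intro k
  by_cases hk : k < m
  · rw [List.getElem?_take_of_lt hk, List.getElem?_map, List.getElem?_range' hk,
        flat_replicate_get _ k (by rw [h10]; omega)]
    simp
  · rw [List.getElem?_eq_none (l := List.take m _) (by rw [List.length_take]; omega),
        List.getElem?_eq_none (by simp [List.length_range']; omega)]

-- zipping a list against the tiled palette is the enumerate-and-index loop
theorem zip_range'_map (K : List Int) (a : Nat) :
    K.zip ((List.range' a K.length).map (fun k => pvColors.getD (k % 10) ""))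
    = (PySem.List.enumerate K ((a : Nat) : Int)).map
        (fun p => (p.2, PySem.List.pyGetD pvColors (PySem.Int.mod p.1 ((10 : Nat) : Int)) ""))
    := by
  induction K generalizing a with
  | nil => rfl
  | cons x rest ih =>
    rw [List.length_cons, List.range'_succ, List.map_cons, List.zip_cons_cons,
        PySem.List.enumerate_cons, List.map_cons]
    have hn1 : ((a : Nat) : Int) + 1 = ((a + 1 : Nat) : Int) := by push_cast; ring
    rw [hn1, ih (a + 1)]
    congr 1
    rw [PySem.Int.mod_natCast a 10, PySem.List.pyGetD_natCast]

-- the fresh keys, independent of positions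
def pvKeys (ids : List Int) (seen : List Int) : List Int :=
  match ids with
  | [] => []
  | x :: rest => if x ∈ seen then pvKeys rest seen else x :: pvKeys rest (x :: seen)

theorem pvFresh_map_fst (ids : List Int) (seen : List Int) (p : Nat) :
    (pvFresh ids seen p).map Prod.fst = pvKeys ids seen := by
  induction ids generalizing seen p with
  | nil => rfl
  | cons x rest ih =>
    simp only [pvFresh, pvKeys]
    split_ifs with hx
    · exact ih seen (p + 1)
    · rw [List.map_cons, ih (x :: seen) (p + 1)]

-- the enumerate-and-index loop over the fresh keys is pvSpec
theorem fresh_to_spec (ids : List Int) (seen : List Int) (n : Nat) :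
    (PySem.List.enumerate (pvKeys ids seen) ((n : Nat) : Int)).map
        (fun p => (p.2, PySem.List.pyGetD pvColors (PySem.Int.mod p.1 ((10 : Nat) : Int)) ""))
    = pvSpec ids seen n := by
  induction ids generalizing seen n with
  | nil => rfl
  | cons x rest ih =>
    simp only [pvKeys, pvSpec]
    split_ifs with hx
    · exact ih seen n
    · rw [PySem.List.enumerate_cons, List.map_cons]
      have hn1 : ((n : Nat) : Int) + 1 = ((n + 1 : Nat) : Int) := by push_cast; ring
      rw [hn1, ih (x :: seen) (n + 1)]
      congr 1
      rw [PySem.Int.mod_natCast n 10, PySem.List.pyGetD_natCast]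

-- items of dict(zip(...)) with distinct keys
theorem pv_ofList_items (L : List (Int × String)) (hnd : (L.map Prod.fst).Nodup) :
    (PySem.Dict.ofList L).items = L := by
  have hofl : PySem.Dict.ofList L = L.foldl (fun d p => d.insert p.1 p.2) PySem.Dict.empty := rfl
  rw [hofl]
  have h := PySem.Dict.items_foldl_insert_fresh L Prod.fst Prod.snd PySem.Dict.empty
    (fun a _ => PySem.Dict.contains_empty a.1) hnd
  simpa using h

-- ===== VERDICT (by name: the statement is the Claim_ definition above) =====
theorem get_ambulance_colors_spec : Claim_equal_get_ambulance_colors := by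
  intro ambulances _ hpre
  have hall : ∀ a ∈ ambulances, (pvGetId? a).isSome := by
    intro a ha; exact List.all_eq_true.1 hpre a ha
  unfold Spec_get_ambulance_colors get_ambulance_colors get_ambulance_colors_alt
  set ids := ambulances.map (fun a => (pvGetId? a).getD 0) with hids
  -- A side
  have hA := foldA_spec ids PySem.Dict.empty 0 (by simp [PySem.Dict.keys_empty])
  norm_num at hA
  simp only [foldA_eq ambulances PySem.Dict.empty 0 hall]
  rw [hA]
  have hemp : (PySem.Dict.empty : PySem.Dict Int String).items = [] := rfl
  rw [hemp, List.nil_append]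
  -- B side
  have hB0 := foldB_eq ambulances 0 PySem.Dict.empty hall
  simp only [hB0, ← hids]
  set D := (PySem.List.enumerate ids 0).foldl
    (fun d q => d.insert q.2 (min (d.getD q.2 q.1) q.1)) PySem.Dict.empty with hD
  have hempI : (PySem.Dict.empty : PySem.Dict Int Int).items = [] := rfl
  have hitems : D.items = pvFresh ids [] 0 := by
    have h := foldB_items ids 0 PySem.Dict.empty (by simp [PySem.Dict.keys_empty])
      (by intro kv hkv; rw [hempI] at hkv; cases hkv)
    rw [hD]
    simpa [hempI, PySem.Dict.keys_empty] using h
  have hnd : D.keys.Nodup := by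
    rw [hD]
    exact PySem.Dict.nodup_keys_foldl_insert_key (PySem.List.enumerate ids 0)
      (fun q => q.2) (fun d q => min (d.getD q.2 q.1) q.1) PySem.Dict.empty
      (by simp [PySem.Dict.keys_empty])
  have hkeys : D.keys = pvKeys ids [] := by
    have h : D.keys = D.items.map Prod.fst := rfl
    rw [h, hitems, pvFresh_map_fst]
  -- the sort by first position is the identity on the keys
  have hpwItems : D.items.Pairwise (fun a b => D.getD a.1 0 < D.getD b.1 0) := by
    have hpf : D.items.Pairwise (fun a b => a.2 < b.2) := by
      rw [hitems]; exact pvFresh_pairwise ids [] 0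
    refine List.Pairwise.imp_of_mem ?_ hpf
    intro a b ha hb hab
    have ha' : (a.1, a.2) ∈ D.items := by simpa using ha
    have hb' : (b.1, b.2) ∈ D.items := by simpa using hb
    rw [PySem.Dict.getD_of_mem_items D ha' hnd 0, PySem.Dict.getD_of_mem_items D hb' hnd 0]
    exact hab
  have hsorted : PySem.List.sorted D.keys (fun k => D.getD k 0) = D.keys := by
    refine PySem.List.sorted_eq_of_perm_of_pairwise_lt _ _ _ (List.Perm.refl _) ?_
    have h : D.keys = D.items.map Prod.fst := rfl
    rw [h, List.pairwise_map]
    exact hpwItems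
  show pvSpec ids [] 0 =
    (PySem.Dict.ofList ((PySem.List.sorted D.keys (fun k => D.getD k 0)).zip
      ((List.replicate ((PySem.List.sorted D.keys (fun k => D.getD k 0)).length / pvColors.length + 1)
          pvColors).flatten.take (PySem.List.sorted D.keys (fun k => D.getD k 0)).length))).items
  rw [hsorted, hkeys, tiled_eq]
  have hzip := zip_range'_map (pvKeys ids []) 0
  simp only [Nat.cast_zero] at hzip
  rw [hzip]
  have hndK : (pvKeys ids []).Nodup := hkeys ▸ hnd
  have hmapfst : (((PySem.List.enumerate (pvKeys ids []) 0).map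
      (fun p => (p.2, PySem.List.pyGetD pvColors (PySem.Int.mod p.1 ((10 : Nat) : Int)) ""))).map
        Prod.fst) = pvKeys ids [] := by
    rw [List.map_map]
    exact PySem.List.map_snd_enumerate (pvKeys ids []) 0
  rw [pv_ofList_items _ (by rw [hmapfst]; exact hndK)]
  have h := fresh_to_spec ids [] 0
  simp only [Nat.cast_zero] at h
  exact h.symm
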